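-- pv_equiv track=rewrite | github.com/shahrukh-uohyd/Multi-language-code-smell-detection | Stage 2/Change-proneness results/Scripts/changed files between two releases.py | get_changed_lines
-- ===== SOURCE A (Python) =====
-- def get_changed_lines(old_content, new_content):
--     """Identify changed lines between two file versions"""
--     old_lines = old_content.splitlines()
--     new_lines = new_content.splitlines()
--     diff = []
--
--     for i, (old_line, new_line) in enumerate(zip(old_lines, new_lines)):
--         if old_line != new_line:
--             diff.append(i+1)  # Line numbers start at 1
--
--     # Handle added/removed lines at the end
--     len_diff = len(new_lines) - len(old_lines)
--     if len_diff > 0: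
--         diff.extend(range(len(old_lines)+1, len(new_lines)+1))
--
--     return diff
-- ===== SOURCE B (Python) =====
-- def get_changed_lines(old_content, new_content):
--     """Identify changed lines between two file versions"""
--     def go(old, new, k):
--         if not new:
--             return []
--         rest = go(old[1:], new[1:], k + 1)
--         if not old or old[0] != new[0]:
--             return [k] + rest
--         return rest
--     return go(old_content.splitlines(), new_content.splitlines(), 1)
-- ===== Notes on version B (the rewrite author's own statement) =====
-- stated objective: alternative
-- what changed: B replaces A's index-based enumerate/zip loop with appended trailing range by a structural recursion over the two line lists that conses line numbers onto the recursively computed tail, handling trailing added lines in the same recursion.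
import Mathlib
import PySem

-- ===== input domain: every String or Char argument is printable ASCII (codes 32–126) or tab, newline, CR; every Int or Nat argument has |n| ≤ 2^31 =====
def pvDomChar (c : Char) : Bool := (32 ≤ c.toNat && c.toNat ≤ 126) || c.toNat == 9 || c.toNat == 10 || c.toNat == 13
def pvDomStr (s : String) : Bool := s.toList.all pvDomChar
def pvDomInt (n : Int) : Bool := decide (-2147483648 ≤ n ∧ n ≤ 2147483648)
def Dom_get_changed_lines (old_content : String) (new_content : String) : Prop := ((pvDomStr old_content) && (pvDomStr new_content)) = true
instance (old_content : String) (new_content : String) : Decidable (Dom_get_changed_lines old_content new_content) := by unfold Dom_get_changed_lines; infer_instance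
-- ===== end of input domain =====

-- B replaces A's enumerate/zip loop plus separate trailing-range extend by a structural
-- recursion over the two line lists, consing line numbers onto the recursive tail (alternative).

-- ===== PORT A =====
def get_changed_lines (old_content : String) (new_content : String) : List Int :=
  let old_lines := PySem.Str.splitlines old_content
  let new_lines := PySem.Str.splitlines new_content
  let diff :=
    (PySem.List.enumerate (old_lines.zip new_lines)).foldl
      (fun acc p => if p.2.1 ≠ p.2.2 then acc ++ [p.1 + 1] else acc) []
  let len_diff : Int := (new_lines.length : Int) - (old_lines.length : Int)
  if len_diff > 0 then
    diff ++ PySem.List.pyRange ((old_lines.length : Int) + 1) ((new_lines.length : Int) + 1)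
  else diff

-- ===== PORT B =====
-- go: if new is empty return []; recurse on the tails with k+1; cons k when old is
-- exhausted or the heads differ (exactly Source B's `go`).
def gclGo : List String → List String → Int → List Int
  | _, [], _ => []
  | [], _ :: ns, k => k :: gclGo [] ns (k + 1)
  | o :: os, _n :: ns, k =>
      let rest := gclGo os ns (k + 1)
      if o ≠ _n then k :: rest else rest

def get_changed_lines_alt (old_content : String) (new_content : String) : List Int :=
  gclGo (PySem.Str.splitlines old_content) (PySem.Str.splitlines new_content) 1

-- ===== PRECONDITION & SPEC =====
def Spec_get_changed_lines (old_content : String) (new_content : String) (out : List Int) : Prop := out = get_changed_lines_alt old_content new_content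
instance (old_content : String) (new_content : String) (out : List Int) : Decidable (Spec_get_changed_lines old_content new_content out) := by unfold Spec_get_changed_lines; infer_instance

-- ===== CLAIM (what is proved, stated in full; the proofs are below) =====
def Claim_equal_get_changed_lines : Prop := ∀ (old_content : String) (new_content : String), Dom_get_changed_lines old_content new_content → Spec_get_changed_lines old_content new_content (get_changed_lines old_content new_content)

-- ===== LEMMAS AND PROOFS =====

lemma gclGo_nil (ns : List String) (k : Int) :
    gclGo [] ns k = PySem.List.pyRange k (k + ns.length) := by
  induction ns generalizing k with
  | nil => simp [gclGo, PySem.List.pyRange_one_eq_nil]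
  | cons n ns ih =>
      rw [gclGo, ih]
      have hb : k + (((n :: ns).length : Nat) : Int) = (k + 1) + (ns.length : Int) := by
        simp only [List.length_cons]; push_cast; ring
      rw [hb]
      conv_rhs => rw [PySem.List.pyRange_one_cons (by omega)]

-- A's loop+extend equals B's recursion, with shifted start index s (line numbers s+1, …)
lemma A_char (ol nl : List String) (s : Int) :
    ((PySem.List.enumerate (ol.zip nl) s).filter
        (fun p : Int × (String × String) => decide ¬ (p.2.1 = p.2.2))).map (fun p => p.1 + 1)
    ++ (if (0:Int) < (nl.length : Int) - (ol.length : Int) then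
          PySem.List.pyRange ((ol.length : Int) + s + 1) ((nl.length : Int) + s + 1) else [])
    = gclGo ol nl (s + 1) := by
  induction nl generalizing ol s with
  | nil =>
      cases ol <;> simp [gclGo]
  | cons n ns ih =>
      cases ol with
      | nil =>
          rw [gclGo_nil]
          simp only [List.zip_nil_left, PySem.List.enumerate, List.filter_nil, List.map_nil,
            List.nil_append, List.length_nil, List.length_cons]
          rw [if_pos (by push_cast; omega)]
          congr 1 <;> push_cast <;> ring
      | cons o os =>
          rw [List.zip_cons_cons, PySem.List.enumerate_cons, List.filter_cons]
          have hlen : ((0:Int) < ((n :: ns).length : Int) - ((o :: os).length : Int)) ↔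
              ((0:Int) < (ns.length : Int) - (os.length : Int)) := by
            simp only [List.length_cons]; push_cast; omega
          have hr1 : ((o :: os).length : Int) + s + 1 = (os.length : Int) + (s + 1) + 1 := by
            simp only [List.length_cons]; push_cast; ring
          have hr2 : ((n :: ns).length : Int) + s + 1 = (ns.length : Int) + (s + 1) + 1 := by
            simp only [List.length_cons]; push_cast; ring
          rw [hr1, hr2]
          simp only [hlen]
          rw [show gclGo (o :: os) (n :: ns) (s + 1)
                = (if o ≠ n then (s + 1) :: gclGo os ns (s + 1 + 1)
                    else gclGo os ns (s + 1 + 1)) from rfl,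
            ← ih os (s + 1)]
          by_cases h : o = n
          · rw [show (decide ¬ ((s, o, n).2.1 = (s, o, n).2.2)) = false from by simp [h]]
            simp only [Bool.false_eq_true, if_false]
            rw [if_neg (show ¬(o ≠ n) from by simp [h])]
          · rw [show (decide ¬ ((s, o, n).2.1 = (s, o, n).2.2)) = true from by simp [h],
              if_pos rfl, List.map_cons, List.cons_append, if_pos (show o ≠ n from h)]

-- turn A's foldl into the filter/map form of A_char
lemma A_foldl (xs : List (Int × (String × String))) :
    xs.foldl (fun acc p => if p.2.1 ≠ p.2.2 then acc ++ [p.1 + 1] else acc) ([] : List Int)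
      = (xs.filter (fun p => decide ¬ (p.2.1 = p.2.2))).map (fun p => p.1 + 1) := by
  have h : (fun (acc : List Int) (p : Int × (String × String)) =>
        if p.2.1 ≠ p.2.2 then acc ++ [p.1 + 1] else acc)
      = (fun acc p => if (fun q : Int × (String × String) => decide ¬ (q.2.1 = q.2.2)) p = true
          then acc ++ [(fun q : Int × (String × String) => q.1 + 1) p] else acc) := by
    funext acc p; simp
  rw [h, PySem.List.foldl_append_if, List.nil_append]

lemma main_eq (ol nl : List String) :
    (if ((nl.length : Int) - (ol.length : Int)) > 0 then
        ((PySem.List.enumerate (ol.zip nl)).foldl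
            (fun acc p => if p.2.1 ≠ p.2.2 then acc ++ [p.1 + 1] else acc) [])
          ++ PySem.List.pyRange ((ol.length : Int) + 1) ((nl.length : Int) + 1)
      else
        (PySem.List.enumerate (ol.zip nl)).foldl
          (fun acc p => if p.2.1 ≠ p.2.2 then acc ++ [p.1 + 1] else acc) [])
    = gclGo ol nl 1 := by
  have hA := A_char ol nl 0
  simp only [add_zero, zero_add] at hA
  by_cases h : (0:Int) < (nl.length : Int) - (ol.length : Int)
  · rw [if_pos (by omega), A_foldl, ← hA, if_pos h]
  · rw [if_neg (by omega), A_foldl, ← hA, if_neg h, List.append_nil]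

-- ===== VERDICT (by name: the statement is the Claim_ definition above) =====
theorem get_changed_lines_spec : Claim_equal_get_changed_lines := by
  intro old_content new_content _
  unfold Spec_get_changed_lines
  exact main_eq (PySem.Str.splitlines old_content) (PySem.Str.splitlines new_content)
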